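-- pv_equiv track=rewrite | github.com/akakss225/Python_tutorial | test.py | solution
-- ===== SOURCE A (Python) =====
-- def solution(p):
--     answer = 0
--     for i in range(len(p)):
--         idx = [i]
--         check = 0
--         while idx:
--             cur = idx.pop()
--             if p[cur] == "<":
--                 next_idx = cur - 1
--                 if next_idx == -1:
--                     check = 1
--                     break
--                 else:
--                     if p[next_idx] == ">":
--                         break
--                     else:
--                         idx.append(next_idx)
--             else:
--                 next_idx = cur + 1
--                 if next_idx == len(p):
--                     check = 1
--                     break
--                 else:
--                     if p[next_idx] == "<":
--                         break
--                     else: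
--                         idx.append(next_idx)
--         if check == 1:
--             answer += 1
--     return answer
-- ===== SOURCE B (Python) =====
-- def solution(p):
--     # An index escapes iff it lies in the leading run of "<" (walks off the
--     # left edge) or in the trailing run of non-"<" (walks off the right edge).
--     lead = 0
--     for c in p:
--         if c != "<":
--             break
--         lead += 1
--     trail = 0
--     for c in reversed(p):
--         if c == "<":
--             break
--         trail += 1
--     return lead + trail
-- ===== Notes on version B (the rewrite author's own statement) =====
-- stated objective: faster
-- what changed: Replaces A's per-index arrow-walk simulation (a while-loop walk from every starting position) by the closed-form observation that a position escapes iff it lies in the leading run of '<' or the trailing run of non-'<', so B just counts those two runs in one pass from each end.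
import Mathlib
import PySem

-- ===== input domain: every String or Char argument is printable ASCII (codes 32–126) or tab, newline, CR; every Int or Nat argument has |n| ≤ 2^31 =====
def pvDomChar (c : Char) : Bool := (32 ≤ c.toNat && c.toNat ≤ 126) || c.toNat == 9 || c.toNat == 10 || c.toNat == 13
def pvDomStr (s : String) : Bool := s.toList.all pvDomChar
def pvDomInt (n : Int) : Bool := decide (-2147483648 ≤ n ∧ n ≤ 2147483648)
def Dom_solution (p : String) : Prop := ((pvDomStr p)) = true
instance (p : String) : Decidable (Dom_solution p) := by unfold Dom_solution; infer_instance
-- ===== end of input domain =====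

-- B replaces A's per-index arrow-walk simulation (O(n^2)) by counting the leading '<' run
-- and the trailing non-'<' run in one pass from each end (O(n)); objective: faster.

-- ===== PORT A =====
-- A's inner `while idx:` loop; the state is the stack `idx` and `check`, exactly as in Python.
-- `fuel` only guards totality: the walk makes at most len+1 steps, so `len+2` fuel is never exhausted.
def solutionWhile (cs : List Char) : Nat → List Int → Int → Int
  | 0, _, check => check
  | f + 1, idx, check =>
    match PySem.List.pop? idx (-1) with
    | none => check                                -- while-condition false: loop exits, return check
    | some (cur, idx') =>
      match PySem.List.pyGet? cs cur with
      | none => check                              -- IndexError (unreachable: cur stays in range)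
      | some c =>
        if c = '<' then
          let next := cur - 1
          if next = -1 then 1                      -- check = 1; break
          else
            match PySem.List.pyGet? cs next with
            | none => check
            | some c2 =>
              if c2 = '>' then check               -- break
              else solutionWhile cs f (idx' ++ [next]) check
        else
          let next := cur + 1
          if next = PySem.List.len cs then 1       -- check = 1; break
          else
            match PySem.List.pyGet? cs next with
            | none => check
            | some c2 =>
              if c2 = '<' then check               -- break
              else solutionWhile cs f (idx' ++ [next]) check

def solution (p : String) : Int :=
  (PySem.List.pyRange 0 (PySem.Str.len p) 1).foldl
    (fun answer i =>
      let check := solutionWhile p.toList (p.toList.length + 2) [i] 0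
      if check = 1 then answer + 1 else answer) 0

-- ===== PORT B =====
-- `for c in p: if c != "<": break; lead += 1`
def solutionLead : List Char → Int
  | [] => 0
  | c :: cs => if c ≠ '<' then 0 else solutionLead cs + 1

-- `for c in reversed(p): if c == "<": break; trail += 1`
def solutionTrail : List Char → Int
  | [] => 0
  | c :: cs => if c = '<' then 0 else solutionTrail cs + 1

def solution_alt (p : String) : Int :=
  solutionLead p.toList + solutionTrail p.toList.reverse

-- ===== PRECONDITION & SPEC =====
def Spec_solution (p : String) (out : Int) : Prop := out = solution_alt p
instance (p : String) (out : Int) : Decidable (Spec_solution p out) := by unfold Spec_solution; infer_instance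

-- ===== CLAIM (what is proved, stated in full; the proofs are below) =====
def Claim_equal_solution : Prop := ∀ (p : String), Dom_solution p → Spec_solution p (solution p)

-- ===== LEMMAS AND PROOFS =====

-- length of the leading '<' run / trailing non-'<' run, as naturals
def leadN (cs : List Char) : Nat := (cs.takeWhile (fun c => c == '<')).length
def trailN (cs : List Char) : Nat := (cs.reverse.takeWhile (fun c => c != '<')).length

theorem solutionLead_eq (cs : List Char) : solutionLead cs = (leadN cs : Int) := by
  induction cs with
  | nil => simp [solutionLead, leadN]
  | cons c t ih =>
    by_cases h : c = '<' <;>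
      simp [solutionLead, leadN, List.takeWhile_cons, h] <;>
      simp [leadN] at ih <;> omega

theorem solutionTrail_eq (cs : List Char) :
    solutionTrail cs = ((cs.takeWhile (fun c => c != '<')).length : Int) := by
  induction cs with
  | nil => simp [solutionTrail]
  | cons c t ih =>
    by_cases h : c = '<' <;>
      simp [solutionTrail, List.takeWhile_cons, h, ih] <;> omega

-- a prefix is all-p iff it sits inside the takeWhile run
theorem take_all_iff (p : Char → Bool) (cs : List Char) :
    ∀ k : Nat, k < cs.length →
      (((cs.take (k+1)).all p) = true ↔ k < (cs.takeWhile p).length) := by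
  induction cs with
  | nil => intro k hk; simp at hk
  | cons c t ih =>
    intro k hk
    cases k with
    | zero => by_cases h : p c <;> simp [List.takeWhile_cons, h]
    | succ k =>
      simp only [List.length_cons] at hk
      by_cases h : p c <;>
        simp [List.takeWhile_cons, h, List.take_succ_cons, ih k (by omega)] <;> omega

theorem drop_all_iff (q : Char → Bool) (cs : List Char) (k : Nat) (hk : k < cs.length) :
    (((cs.drop k).all q) = true ↔ cs.length - (cs.reverse.takeWhile q).length ≤ k) := by
  have hrev : ((cs.drop k).all q) = ((cs.reverse.take (cs.length - 1 - k + 1)).all q) := by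
    conv_lhs => rw [← List.all_reverse]
    rw [List.reverse_drop, show cs.length - k = cs.length - 1 - k + 1 by omega]
  have htw : (cs.reverse.takeWhile q).length ≤ cs.length := by
    have := List.Sublist.length_le (List.takeWhile_sublist (p := q) (l := cs.reverse))
    simpa using this
  rw [hrev, take_all_iff q cs.reverse (cs.length - 1 - k)
        (by simp only [List.length_reverse]; omega)]
  omega

-- all-of-prefix forces cs[k] itself; same for suffixes
theorem take_all_getElem (p : Char → Bool) (cs : List Char) (k : Nat) (hk : k < cs.length)
    (h : ((cs.take (k+1)).all p) = true) : p cs[k] = true := by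
  have hmem : cs[k] ∈ cs.take (k+1) := by
    have : (cs.take (k+1))[k]'(by simp; omega) = cs[k] := List.getElem_take
    exact this ▸ List.getElem_mem _
  exact List.all_eq_true.mp h _ hmem

theorem drop_all_getElem (q : Char → Bool) (cs : List Char) (k : Nat) (hk : k < cs.length)
    (h : ((cs.drop k).all q) = true) : q cs[k] = true := by
  have hmem : cs[k] ∈ cs.drop k := by
    have : (cs.drop k)[0]'(by rw [List.length_drop]; omega) = cs[k] := by
      simp [List.getElem_drop]
    exact this ▸ List.getElem_mem _
  exact List.all_eq_true.mp h _ hmem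

-- one unfolding of A's while loop, in terms of the Nat position
theorem pop_singleton (x : Int) : PySem.List.pop? [x] (-1) = some (x, []) := rfl

theorem while_step (cs : List Char) (f k : Nat) (hk : k < cs.length) :
    solutionWhile cs (f+1) [(k : Int)] 0 =
      if cs[k] = '<' then
        if k = 0 then 1
        else if cs[k-1]'(by omega) = '>' then 0
        else solutionWhile cs f [((k-1 : Nat) : Int)] 0
      else
        if he : k + 1 = cs.length then 1
        else if cs[k+1]'(by omega) = '<' then 0
        else solutionWhile cs f [((k+1 : Nat) : Int)] 0 := by
  simp only [solutionWhile, pop_singleton, PySem.List.pyGet?_natCast,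
    List.getElem?_eq_getElem hk]
  by_cases h : cs[k] = '<'
  · rw [if_pos h, if_pos h]
    by_cases hz : k = 0
    · subst hz; norm_num
    · rw [if_neg hz, if_neg (show ¬((k : Int) - 1 = -1) by omega)]
      rw [show (k : Int) - 1 = ((k - 1 : Nat) : Int) by omega]
      rw [PySem.List.pyGet?_natCast,
        List.getElem?_eq_getElem (show k - 1 < cs.length by omega)]
      by_cases hg : cs[k-1]'(by omega) = '>' <;> simp [hg]
  · rw [if_neg h, if_neg h]
    by_cases he : k + 1 = cs.length
    · rw [dif_pos he]
      rw [if_pos (show (k : Int) + 1 = PySem.List.len cs by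
        rw [PySem.List.len_eq]; omega)]
    · rw [dif_neg he]
      rw [if_neg (show ¬((k : Int) + 1 = PySem.List.len cs) by
        rw [PySem.List.len_eq]; omega)]
      rw [show (k : Int) + 1 = ((k + 1 : Nat) : Int) by omega]
      rw [PySem.List.pyGet?_natCast,
        List.getElem?_eq_getElem (show k + 1 < cs.length by omega)]
      by_cases hlt : cs[k+1]'(by omega) = '<' <;> simp [hlt]

-- specialisations of the run characterisations to the two runs B counts
theorem take_all_lead (cs : List Char) (k : Nat) (hk : k < cs.length) :
    (((cs.take (k+1)).all (fun c => c == '<')) = true ↔ k < leadN cs) :=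
  take_all_iff _ cs k hk

theorem drop_all_trail (cs : List Char) (k : Nat) (hk : k < cs.length) :
    (((cs.drop k).all (fun c => c != '<')) = true ↔ cs.length - trailN cs ≤ k) :=
  drop_all_iff _ cs k hk

-- starting on a '<': the walk escapes left iff the whole prefix up to k is '<'
theorem while_left (cs : List Char) :
    ∀ (k f : Nat) (hk : k < cs.length), cs[k] = '<' → k + 2 ≤ f →
      solutionWhile cs f [(k : Int)] 0 =
        if ((cs.take (k+1)).all (fun c => c == '<')) then 1 else 0 := by
  intro k
  induction k with
  | zero =>
    intro f hk hc hf
    obtain ⟨f', rfl⟩ : ∃ f', f = f' + 1 := ⟨f - 1, by omega⟩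
    rw [while_step cs f' 0 hk]
    simp [hc, List.take_succ, List.getElem?_eq_getElem hk]
  | succ k ih =>
    intro f hk hc hf
    obtain ⟨f', rfl⟩ : ∃ f', f = f' + 1 := ⟨f - 1, by omega⟩
    rw [while_step cs f' (k+1) hk]
    have hks : k < cs.length := by omega
    have htake : cs.take (k+1+1) = cs.take (k+1) ++ [cs[k+1]] := by
      rw [List.take_succ, List.getElem?_eq_getElem hk]; rfl
    by_cases hp : cs[k]'hks = '<'
    · rw [if_pos hc, if_neg (by omega : ¬ (k+1 = 0))]
      simp only [Nat.add_sub_cancel]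
      rw [if_neg (by simp [hp])]
      rw [ih f' hks hp (by omega)]
      rw [htake]
      simp [hc]
    · have hfalse : ¬ (((cs.take (k+1+1)).all (fun c => c == '<')) = true) := by
        intro hall
        rw [htake, List.all_append] at hall
        simp only [Bool.and_eq_true] at hall
        have := take_all_getElem _ cs k hks hall.1
        simp [hp] at this
      rw [if_pos hc, if_neg (by omega : ¬ (k+1 = 0))]
      simp only [Nat.add_sub_cancel]
      by_cases hgt : cs[k]'hks = '>'
      · rw [if_pos hgt, if_neg hfalse]
      · rw [if_neg hgt]
        obtain ⟨f'', rfl⟩ : ∃ f'', f' = f'' + 1 := ⟨f' - 1, by omega⟩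
        rw [while_step cs f'' k hks]
        rw [if_neg hp, dif_neg (by omega : ¬ (k + 1 = cs.length))]
        rw [if_pos hc, if_neg hfalse]

-- starting off '<': the walk escapes right iff the whole suffix from k has no '<'
theorem while_right (cs : List Char) :
    ∀ (f k : Nat) (hk : k < cs.length), cs[k] ≠ '<' → (cs.length - k) + 1 ≤ f →
      solutionWhile cs f [(k : Int)] 0 =
        if ((cs.drop k).all (fun c => c != '<')) then 1 else 0 := by
  intro f
  induction f with
  | zero => intro k hk hc hf; omega
  | succ f ih =>
    intro k hk hc hf
    rw [while_step cs f k hk]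
    rw [if_neg hc]
    have hdrop : cs.drop k = cs[k] :: cs.drop (k+1) := List.drop_eq_getElem_cons hk
    by_cases he : k + 1 = cs.length
    · rw [dif_pos he]
      have hnil : cs.drop (k+1) = [] := by
        apply List.drop_eq_nil_of_le; omega
      rw [hdrop, hnil]
      simp [hc]
    · rw [dif_neg he]
      have hk1 : k + 1 < cs.length := by omega
      have hdrop1 : cs.drop (k+1) = cs[k+1] :: cs.drop (k+2) := List.drop_eq_getElem_cons hk1
      by_cases hlt : cs[k+1]'hk1 = '<'
      · rw [if_pos hlt]
        rw [hdrop, hdrop1]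
        simp [hlt]
      · rw [if_neg hlt]
        rw [ih (k+1) hk1 hlt (by omega)]
        have hsame : ((cs.drop k).all (fun c => c != '<'))
            = ((cs.drop (k+1)).all (fun c => c != '<')) := by
          rw [hdrop, List.all_cons]
          have hb : (cs[k] != '<') = true := by simp [hc]
          rw [hb, Bool.true_and]
        rw [hsame]

-- the two run lengths never overlap
theorem lead_trail_le (cs : List Char) : leadN cs + trailN cs ≤ cs.length := by
  by_contra hcon
  push_neg at hcon
  have hL : leadN cs ≤ cs.length := by
    have := List.Sublist.length_le (List.takeWhile_sublist (p := fun c => c == '<') (l := cs))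
    simpa [leadN] using this
  have hT : trailN cs ≤ cs.length := by
    have := List.Sublist.length_le
      (List.takeWhile_sublist (p := fun c => c != '<') (l := cs.reverse))
    simpa [trailN] using this
  set k := cs.length - trailN cs with hkdef
  have hk : k < cs.length := by omega
  have h1 : ((cs.take (k+1)).all (fun c => c == '<')) = true :=
    (take_all_lead cs k hk).mpr (by omega)
  have h2 : ((cs.drop k).all (fun c => c != '<')) = true :=
    (drop_all_trail cs k hk).mpr (by omega)
  have e1 := take_all_getElem _ cs k hk h1
  have e2 := drop_all_getElem _ cs k hk h2
  simp at e1 e2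
  exact e2 e1

-- the per-start-index characterisation of A's walk
theorem while_eq (cs : List Char) (k : Nat) (hk : k < cs.length) :
    solutionWhile cs (cs.length + 2) [(k : Int)] 0 =
      if (k < leadN cs ∨ cs.length - trailN cs ≤ k) then 1 else 0 := by
  by_cases hc : cs[k] = '<'
  · rw [while_left cs k (cs.length + 2) hk hc (by omega)]
    by_cases h : ((cs.take (k+1)).all (fun c => c == '<')) = true
    · rw [if_pos h, if_pos (Or.inl ((take_all_lead cs k hk).mp h))]
    · rw [if_neg (by simpa using h), if_neg]
      rintro (hL | hR)
      · exact h ((take_all_lead cs k hk).mpr hL)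
      · have h2 := (drop_all_trail cs k hk).mpr hR
        have := drop_all_getElem _ cs k hk h2
        simp [hc] at this
  · rw [while_right cs (cs.length + 2) k hk hc (by omega)]
    by_cases h : ((cs.drop k).all (fun c => c != '<')) = true
    · rw [if_pos h, if_pos (Or.inr ((drop_all_trail cs k hk).mp h))]
    · rw [if_neg (by simpa using h), if_neg]
      rintro (hL | hR)
      · have h1 := (take_all_lead cs k hk).mpr hL
        have := take_all_getElem _ cs k hk h1
        simp [hc] at this
      · exact h ((drop_all_trail cs k hk).mpr hR)

-- a 0/1-counting foldl is a countP
theorem foldl_count {α : Type} (l : List α) (P : α → Prop) [DecidablePred P] :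
    ∀ a : Int, l.foldl (fun acc i => if P i then acc + 1 else acc) a
      = a + ((l.countP (fun i => decide (P i)) : Nat) : Int) := by
  induction l with
  | nil => intro a; simp
  | cons x t ih =>
    intro a
    by_cases h : P x <;> simp [List.countP_cons, h, ih] <;> push_cast <;> ring

theorem countP_range_lt (n L : Nat) (h : L ≤ n) :
    (List.range n).countP (fun k => decide (k < L)) = L := by
  induction n with
  | zero => simp_all
  | succ n ih =>
    rw [List.range_succ, List.countP_append]
    by_cases hL : L ≤ n
    · rw [ih hL]
      simp; omega
    · have hLn : L = n + 1 := by omega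
      subst hLn
      have : (List.range n).countP (fun k => decide (k < n + 1)) = n := by
        rw [List.countP_eq_length.mpr]
        · exact List.length_range
        · intro a ha; simp at ha ⊢; omega
      rw [this]; simp

theorem countP_range_ge (n c : Nat) (h : c ≤ n) :
    (List.range n).countP (fun k => decide (c ≤ k)) = n - c := by
  induction n with
  | zero => simp_all
  | succ n ih =>
    rw [List.range_succ, List.countP_append]
    by_cases hc : c ≤ n
    · rw [ih hc]; simp [hc]; omega
    · have : c = n + 1 := by omega
      subst this
      have : (List.range n).countP (fun k => decide (n + 1 ≤ k)) = 0 := by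
        rw [List.countP_eq_zero.mpr]
        intro a ha; simp at ha ⊢; omega
      rw [this]; simp

theorem countP_or_disjoint {α : Type} (l : List α) (p q : α → Bool)
    (h : ∀ k ∈ l, ¬ (p k = true ∧ q k = true)) :
    l.countP (fun k => p k || q k) = l.countP p + l.countP q := by
  induction l with
  | nil => simp
  | cons x t ih =>
    have ht : ∀ k ∈ t, ¬ (p k = true ∧ q k = true) :=
      fun k hk => h k (List.mem_cons_of_mem _ hk)
    have hx := h x List.mem_cons_self
    cases hp : p x <;> cases hq : q x
    · simp [List.countP_cons, hp, hq, ih ht]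
    · simp [List.countP_cons, hp, hq, ih ht]
      try omega
    · simp [List.countP_cons, hp, hq, ih ht]
      try omega
    · exact absurd ⟨hp, hq⟩ hx
    
theorem countP_window (n L T : Nat) (h : L + T ≤ n) :
    (List.range n).countP (fun k => decide (k < L ∨ n - T ≤ k)) = L + T := by
  have hfun : (fun k : Nat => decide (k < L ∨ n - T ≤ k))
      = (fun k : Nat => decide (k < L) || decide (n - T ≤ k)) := by
    funext k
    by_cases h1 : k < L <;> by_cases h2 : n - T ≤ k <;> simp [h1, h2]
  rw [hfun, countP_or_disjoint _ _ _ (by intro k hk; simp at hk ⊢; omega)]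
  rw [countP_range_lt n L (by omega), countP_range_ge n (n - T) (by omega)]
  omega

-- ===== VERDICT (by name: the statement is the Claim_ definition above) =====
theorem solution_spec : Claim_equal_solution := by
  intro p _
  unfold Spec_solution solution solution_alt
  have hlen : PySem.Str.len p = (p.toList.length : Int) := by simp
  rw [hlen, PySem.List.pyRange_one]
  have hsub : ((p.toList.length : Int) - 0).toNat = p.toList.length := by omega
  rw [hsub]
  set cs := p.toList with hcs
  rw [show (fun (answer i : Int) =>
        let check := solutionWhile cs (cs.length + 2) [i] 0
        if check = 1 then answer + 1 else answer)
      = (fun (answer i : Int) =>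
        if solutionWhile cs (cs.length + 2) [i] 0 = 1 then answer + 1 else answer) from rfl]
  rw [foldl_count _ (fun i : Int => solutionWhile cs (cs.length + 2) [i] 0 = 1)]
  rw [List.countP_map]
  have hcong : (List.range cs.length).countP
        ((fun i : Int => decide (solutionWhile cs (cs.length + 2) [i] 0 = 1))
          ∘ (fun k : Nat => (0 : Int) + (k : Int)))
      = (List.range cs.length).countP
          (fun k => decide (k < leadN cs ∨ cs.length - trailN cs ≤ k)) := by
    apply List.countP_congr
    intro k hk
    simp only [List.mem_range] at hk
    simp only [Function.comp_apply, zero_add, decide_eq_true_eq]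
    rw [while_eq cs k hk]
    by_cases h : (k < leadN cs ∨ cs.length - trailN cs ≤ k)
    · rw [if_pos h]
      exact iff_of_true rfl h
    · rw [if_neg h]
      exact iff_of_false (by decide) h
  rw [hcong, countP_window cs.length (leadN cs) (trailN cs) (lead_trail_le cs)]
  rw [solutionLead_eq, solutionTrail_eq]
  simp only [trailN]
  push_cast
  ring
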